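-- pv_equiv track=rewrite | github.com/solozambously/mastermind_projectNSI2025 | main.py | correct_colors_wrong_position
-- ===== SOURCE A (Python) =====
-- def correct_colors_wrong_position(random_color_sequence, guess):
--     """
--     Count the number of correct colors in the guess.
--     """
--     counter_wrong_position = 0
--     for i in range(4):
--         for j in range(4):
--             if guess[j] == random_color_sequence[i]:
--                 counter_wrong_position += 1
--
--     pion_blanc = ["aucun pion blanc", "un pion blanc", "deux pions blancs", "trois pions blancs", "quatre pions blancs"][counter_wrong_position]
--
--     return pion_blanc
-- ===== SOURCE B (Python) =====
-- def correct_colors_wrong_position(random_color_sequence, guess):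
--     """
--     Count the number of correct colors in the guess.
--     """
--     seq = [random_color_sequence[i] for i in range(4)]
--     g = [guess[j] for j in range(4)]
--     seq_counts = {}
--     for c in seq:
--         seq_counts[c] = seq_counts.get(c, 0) + 1
--     g_counts = {}
--     for c in g:
--         g_counts[c] = g_counts.get(c, 0) + 1
--     counter_wrong_position = 0
--     for c, cnt in g_counts.items():
--         counter_wrong_position += cnt * seq_counts.get(c, 0)
--     return ["aucun pion blanc", "un pion blanc", "deux pions blancs",
--             "trois pions blancs", "quatre pions blancs"][counter_wrong_position]
-- ===== Notes on version B (the rewrite author's own statement) =====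
-- stated objective: alternative
-- what changed: Replaces the nested 4x4 comparison loops by building frequency tables (dicts) of the first four entries of each list once and summing the dot product of the two counters; the inner comparison scan disappears.
import Mathlib
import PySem

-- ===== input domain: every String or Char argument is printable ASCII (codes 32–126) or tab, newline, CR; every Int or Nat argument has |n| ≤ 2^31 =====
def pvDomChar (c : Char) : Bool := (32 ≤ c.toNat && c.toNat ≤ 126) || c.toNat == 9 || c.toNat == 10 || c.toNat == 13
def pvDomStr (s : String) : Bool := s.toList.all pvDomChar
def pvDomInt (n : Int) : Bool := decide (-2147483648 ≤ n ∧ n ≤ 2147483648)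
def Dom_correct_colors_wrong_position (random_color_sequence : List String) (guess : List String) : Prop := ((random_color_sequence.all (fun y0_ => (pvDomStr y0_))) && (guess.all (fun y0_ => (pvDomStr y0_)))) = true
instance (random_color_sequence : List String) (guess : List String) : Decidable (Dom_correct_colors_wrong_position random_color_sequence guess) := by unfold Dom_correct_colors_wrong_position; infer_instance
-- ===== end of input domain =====

-- B replaces A's nested 4x4 comparison loops by two frequency tables (counters of the
-- first four entries of each list) and a dot product; same return value wherever A returns.

-- ===== PORT A =====
def correct_colors_wrong_position (random_color_sequence : List String) (guess : List String) : String :=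
  let counter_wrong_position : Int :=
    (PySem.List.pyRange 0 4 1).foldl (fun acc i =>
      (PySem.List.pyRange 0 4 1).foldl (fun acc2 j =>
        if (PySem.List.pyGet? guess j).getD "" == (PySem.List.pyGet? random_color_sequence i).getD ""
        then acc2 + 1 else acc2) acc) 0
  (PySem.List.pyGet? ["aucun pion blanc", "un pion blanc", "deux pions blancs",
    "trois pions blancs", "quatre pions blancs"] counter_wrong_position).getD ""

-- ===== PORT B =====
def correct_colors_wrong_position_alt (random_color_sequence : List String) (guess : List String) : String :=
  let seq := (PySem.List.pyRange 0 4 1).map (fun i => (PySem.List.pyGet? random_color_sequence i).getD "")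
  let g := (PySem.List.pyRange 0 4 1).map (fun j => (PySem.List.pyGet? guess j).getD "")
  let seq_counts : PySem.Dict String Int :=
    seq.foldl (fun d c => d.insert c (d.getD c 0 + 1)) PySem.Dict.empty
  let g_counts : PySem.Dict String Int :=
    g.foldl (fun d c => d.insert c (d.getD c 0 + 1)) PySem.Dict.empty
  let counter_wrong_position : Int :=
    g_counts.items.foldl (fun acc p => acc + p.2 * seq_counts.getD p.1 0) 0
  (PySem.List.pyGet? ["aucun pion blanc", "un pion blanc", "deux pions blancs",
    "trois pions blancs", "quatre pions blancs"] counter_wrong_position).getD ""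

-- ===== PRECONDITION & SPEC =====
-- Pre_ = exactly the inputs on which the Python A returns normally: both lists have at
-- least four elements (else guess[j] / random_color_sequence[i] raises IndexError) and
-- the number of matching (i, j) pairs among the first four entries is at most 4 (else the
-- final index into the five-element message list raises IndexError).
def Pre_correct_colors_wrong_position (random_color_sequence : List String) (guess : List String) : Prop :=
  4 ≤ random_color_sequence.length ∧ 4 ≤ guess.length ∧
  (((random_color_sequence.take 4).map (fun c => (guess.take 4).count c)).sum ≤ 4)
instance (random_color_sequence : List String) (guess : List String) : Decidable (Pre_correct_colors_wrong_position random_color_sequence guess) := by unfold Pre_correct_colors_wrong_position; infer_instance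

def pvWitness_correct_colors_wrong_position : List String × List String :=
  (["rouge", "vert", "bleu", "jaune"], ["vert", "rouge", "noir", "jaune"])

def Spec_correct_colors_wrong_position (random_color_sequence : List String) (guess : List String) (out : String) : Prop := out = correct_colors_wrong_position_alt random_color_sequence guess
instance (random_color_sequence : List String) (guess : List String) (out : String) : Decidable (Spec_correct_colors_wrong_position random_color_sequence guess out) := by unfold Spec_correct_colors_wrong_position; infer_instance

-- ===== CLAIM (what is proved, stated in full; the proofs are below) =====
def Claim_equal_correct_colors_wrong_position : Prop := ∀ (random_color_sequence : List String) (guess : List String), Dom_correct_colors_wrong_position random_color_sequence guess → Pre_correct_colors_wrong_position random_color_sequence guess → Spec_correct_colors_wrong_position random_color_sequence guess (correct_colors_wrong_position random_color_sequence guess)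

-- ===== LEMMAS AND PROOFS =====

-- pointwise sum of mapped functions splits
theorem pv_sum_map_add (l : List String) (f g : String → Int) :
    (l.map (fun x => f x + g x)).sum = (l.map f).sum + (l.map g).sum := by
  induction l with
  | nil => simp
  | cons h t ih => simp [ih]; ring

-- sum of indicators is a count
theorem pv_sum_map_indicator (l : List String) (v : String) :
    (l.map (fun x => if x == v then (1 : Int) else 0)).sum = (l.count v : Int) := by
  induction l with
  | nil => simp
  | cons h t ih =>
    simp only [List.map_cons, List.sum_cons, List.count_cons, ih]
    by_cases hv : h = v
    · simp [hv]; ring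
    · simp [hv]

-- double-counting swap: sum over l1 of counts in l2 = sum over l2 of counts in l1
theorem pv_count_swap (l1 l2 : List String) :
    (l1.map (fun s => (l2.count s : Int))).sum = (l2.map (fun g => (l1.count g : Int))).sum := by
  induction l2 with
  | nil => simp
  | cons h t ih =>
    simp only [List.map_cons, List.sum_cons, ← ih]
    have hpt : (l1.map (fun s => ((h :: t).count s : Int))).sum
        = (l1.map (fun s => (t.count s : Int) + if s == h then (1 : Int) else 0)).sum := by
      apply congrArg
      apply List.map_congr_left
      intro x _
      rw [List.count_cons]
      by_cases hx : x = h
      · simp [hx]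
      · simp [hx, Ne.symm hx]
    rw [hpt, pv_sum_map_add, pv_sum_map_indicator]
    ring

-- grouping by distinct values: sum over set(l) of count * f = sum over l of f
theorem pv_sum_dedup_count (l : List String) (f : String → Int) :
    ((PySem.Set.ofList l).map (fun k => (l.count k : Int) * f k)).sum = (l.map f).sum := by
  have hnd : (PySem.Set.ofList l).Nodup := PySem.Set.nodup_ofList l
  have hfin : (PySem.Set.ofList l).toFinset = l.toFinset := by
    ext x
    simp [List.mem_toFinset, PySem.Set.mem_ofList]
  calc ((PySem.Set.ofList l).map (fun k => (l.count k : Int) * f k)).sum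
      = ((PySem.Set.ofList l).toFinset).sum (fun k => (l.count k : Int) * f k) := by
        rw [List.sum_toFinset _ hnd]
    _ = (l.toFinset).sum (fun k => (l.count k : Int) * f k) := by rw [hfin]
    _ = (l.map f).sum := by
        rw [Finset.sum_list_map_count l f]
        apply Finset.sum_congr rfl
        intro x _
        rw [nsmul_eq_mul]

-- the inner j-loop counts occurrences among the fetched guess values
theorem pv_inner_fold (γ : Int → String) (l : List Int) (s : String) (acc : Int) :
    l.foldl (fun acc2 j => if γ j == s then acc2 + 1 else acc2) acc
    = acc + ((l.map γ).count s : Int) := by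
  induction l generalizing acc with
  | nil => simp
  | cons h t ih =>
    simp only [List.foldl_cons, List.map_cons, List.count_cons, ih]
    by_cases hh : γ h = s
    · simp [hh]; ring
    · simp [hh]

-- an accumulate-through-a-getter loop is a sum over the fetched values
theorem pv_foldl_add_comp (σ : Int → String) (C : String → Int) (l : List Int) (a : Int) :
    l.foldl (fun acc i => acc + C (σ i)) a = a + ((l.map σ).map C).sum := by
  induction l generalizing a with
  | nil => simp
  | cons h t ih => simp [ih]; ring

-- A's counter equals B's counter (no precondition needed: both read through the same getters)
theorem pv_counters_eq (random_color_sequence : List String) (guess : List String) :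
    (((PySem.List.pyRange 0 4 1).map (fun j => (PySem.List.pyGet? guess j).getD "")).foldl
        (fun d c => d.insert c (d.getD c 0 + 1)) PySem.Dict.empty).items.foldl
      (fun acc p => acc + p.2 *
        (((PySem.List.pyRange 0 4 1).map (fun i => (PySem.List.pyGet? random_color_sequence i).getD "")).foldl
          (fun d c => d.insert c (d.getD c 0 + 1)) PySem.Dict.empty).getD p.1 0) 0
    = (PySem.List.pyRange 0 4 1).foldl (fun acc i =>
        (PySem.List.pyRange 0 4 1).foldl (fun acc2 j =>
          if (PySem.List.pyGet? guess j).getD "" == (PySem.List.pyGet? random_color_sequence i).getD ""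
          then acc2 + 1 else acc2) acc) (0 : Int) := by
  set seq := (PySem.List.pyRange 0 4 1).map (fun i => (PySem.List.pyGet? random_color_sequence i).getD "") with hseq
  set g := (PySem.List.pyRange 0 4 1).map (fun j => (PySem.List.pyGet? guess j).getD "") with hg
  -- B side: counters and the dot product
  rw [PySem.Dict.foldl_insert_getD_add_one_eq_counter, PySem.Dict.foldl_insert_getD_add_one_eq_counter]
  rw [PySem.Dict.items_counter]
  rw [PySem.List.foldl_add (g := fun p : String × Int => p.2 * (PySem.Dict.counter seq).getD p.1 0)]
  rw [List.map_map]
  have hmap : ((PySem.Set.ofList g).map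
      ((fun p : String × Int => p.2 * (PySem.Dict.counter seq).getD p.1 0) ∘ fun k => (k, (g.count k : Int))))
      = (PySem.Set.ofList g).map (fun k => (g.count k : Int) * (seq.count k : Int)) := by
    apply List.map_congr_left
    intro k _
    simp [Function.comp, PySem.Dict.getD_counter]
  rw [hmap, pv_sum_dedup_count g (fun k => (seq.count k : Int))]
  -- A side: inner loop is a count, outer loop is a sum
  have houter : (PySem.List.pyRange 0 4 1).foldl (fun acc i =>
      (PySem.List.pyRange 0 4 1).foldl (fun acc2 j =>
        if (PySem.List.pyGet? guess j).getD "" == (PySem.List.pyGet? random_color_sequence i).getD ""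
        then acc2 + 1 else acc2) acc) (0 : Int)
      = (PySem.List.pyRange 0 4 1).foldl (fun acc i =>
          acc + ((g.count ((PySem.List.pyGet? random_color_sequence i).getD "") : Nat) : Int)) 0 := by
    apply PySem.List.foldl_congr_mem
    intro acc i _
    rw [hg, pv_inner_fold (fun j => (PySem.List.pyGet? guess j).getD "")]
  rw [houter, pv_foldl_add_comp (fun i => (PySem.List.pyGet? random_color_sequence i).getD "")
      (fun s => ((g.count s : Nat) : Int)), ← hseq]
  rw [show (seq.map (fun s => ((g.count s : Nat) : Int))) = seq.map (fun s => (g.count s : Int)) from rfl]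
  rw [pv_count_swap seq g]

-- ===== VERDICT (by name: the statement is the Claim_ definition above) =====
theorem correct_colors_wrong_position_spec : Claim_equal_correct_colors_wrong_position := by
  intro random_color_sequence guess _ _
  unfold Spec_correct_colors_wrong_position
  simp only [correct_colors_wrong_position, correct_colors_wrong_position_alt,
    pv_counters_eq random_color_sequence guess]
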